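-- pv_equiv track=rewrite | github.com/benrm/AdventOfCode2023 | day14/part2.py | fingerprint
-- ===== SOURCE A (Python) =====
-- def fingerprint(grid):
--     f = 0
--     for row in grid:
--         for char in row:
--             f = f << 1
--             if char == "O":
--                 f = f | 1
--     return f
-- ===== SOURCE B (Python) =====
-- def fingerprint(grid):
--     cells = [c for row in grid for c in row]
--     total = 0
--     p = 1
--     for c in reversed(cells):
--         if c == "O":
--             total += p
--         p <<= 1
--     return total
-- ===== Notes on version B (the rewrite author's own statement) =====
-- stated objective: alternative
-- what changed: Replaces the nested shift-and-OR Horner accumulation with a single pass over the flattened cell list in reverse order, adding an explicitly maintained power-of-two for each 'O'.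
import Mathlib
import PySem

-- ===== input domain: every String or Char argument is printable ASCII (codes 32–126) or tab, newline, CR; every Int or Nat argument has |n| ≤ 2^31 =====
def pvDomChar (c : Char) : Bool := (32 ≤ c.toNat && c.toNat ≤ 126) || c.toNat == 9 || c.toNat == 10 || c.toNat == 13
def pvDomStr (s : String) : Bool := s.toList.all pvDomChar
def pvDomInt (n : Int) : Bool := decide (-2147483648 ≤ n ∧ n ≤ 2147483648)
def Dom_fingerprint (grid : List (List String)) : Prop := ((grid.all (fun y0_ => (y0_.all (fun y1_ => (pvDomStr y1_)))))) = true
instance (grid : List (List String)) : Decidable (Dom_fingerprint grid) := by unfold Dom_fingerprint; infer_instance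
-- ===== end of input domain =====

-- B replaces A's nested shift-and-OR accumulation by one reverse pass over the
-- flattened cells with an explicit power-of-two accumulator (alternative decomposition).


-- ===== PORT A =====
-- f << 1 is f * 2; f | 1 on an even f is f + 1 (exact for Python ints here).
def fingerprint (grid : List (List String)) : Int :=
  grid.foldl (fun f row =>
    row.foldl (fun f char =>
      if char == "O" then f * 2 + 1 else f * 2) f) 0

-- ===== PORT B =====
-- cells = flattened comprehension; reversed pass with (total, p) state; p <<= 1 is p * 2.
def fingerprint_alt (grid : List (List String)) : Int :=
  let cells := grid.flatten
  (cells.reverse.foldl (fun (s : Int × Int) c =>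
    (if c == "O" then s.1 + s.2 else s.1, s.2 * 2)) (0, 1)).1

-- ===== PRECONDITION & SPEC =====
def Spec_fingerprint (grid : List (List String)) (out : Int) : Prop := out = fingerprint_alt grid
instance (grid : List (List String)) (out : Int) : Decidable (Spec_fingerprint grid out) := by unfold Spec_fingerprint; infer_instance

-- ===== CLAIM (what is proved, stated in full; the proofs are below) =====
def Claim_equal_fingerprint : Prop := ∀ (grid : List (List String)), Dom_fingerprint grid → Spec_fingerprint grid (fingerprint grid)

-- ===== LEMMAS AND PROOFS =====

-- little-endian value of a cell list: head is the least-significant bit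
def pvLE : List String → Int
  | [] => 0
  | c :: t => (if c == "O" then (1:Int) else 0) + 2 * pvLE t

theorem pvLE_append (xs : List String) (c : String) :
    pvLE (xs ++ [c]) = pvLE xs + (if c == "O" then (1:Int) else 0) * 2 ^ xs.length := by
  induction xs with
  | nil => simp [pvLE]
  | cons x t ih => simp [pvLE, ih, pow_succ]; split_ifs <;> ring

theorem pvB_foldl (l : List String) (t p : Int) :
    (l.foldl (fun (s : Int × Int) c =>
      (if c == "O" then s.1 + s.2 else s.1, s.2 * 2)) (t, p)).1 = t + p * pvLE l := by
  induction l generalizing t p with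
  | nil => simp [pvLE]
  | cons c tl ih =>
      simp only [List.foldl_cons, ih, pvLE]
      split_ifs <;> ring

theorem pvA_foldl (l : List String) (a : Int) :
    l.foldl (fun f char =>
      if char == "O" then f * 2 + 1 else f * 2) a = pvLE l.reverse + a * 2 ^ l.length := by
  induction l generalizing a with
  | nil => simp [pvLE]
  | cons c tl ih =>
      simp only [List.foldl_cons, List.reverse_cons, ih, pvLE_append, List.length_reverse,
        List.length_cons, pow_succ]
      split_ifs <;> ring

-- ===== VERDICT (by name: the statement is the Claim_ definition above) =====
theorem fingerprint_spec : Claim_equal_fingerprint := by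
  intro grid _
  unfold Spec_fingerprint fingerprint fingerprint_alt
  rw [pvB_foldl]
  rw [← List.foldl_flatten]
  rw [pvA_foldl]
  simp
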